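-- pv_equiv track=rewrite | github.com/aws/aws-sdk-pandas | awswrangler/s3/_read_parallel.py | _calculate_chunks_sizes
-- ===== SOURCE A (Python) =====
-- import math
-- from typing import Any, Callable, Dict, Iterator, List, cast
--
-- def _calculate_chunks_sizes(total_size: int, max_size: int) -> Iterator[int]:
--     num: int = int(math.ceil(float(total_size) / float(max_size)))
--     min_size: int = int(total_size / num)
--     rest: int = total_size % num
--     for _ in range(num):
--         if rest > 0:
--             rest -= 1
--             yield min_size + 1
--         else:
--             yield min_size
-- ===== SOURCE B (Python) =====
-- import math
-- from typing import Iterator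
--
-- def _calculate_chunks_sizes(total_size: int, max_size: int) -> Iterator[int]:
--     # Stateless re-implementation: chunk i of the "extras go to the first
--     # chunks" split is the closed form (total_size + num - 1 - i) // num,
--     # so no running min_size/rest bookkeeping is needed.
--     num: int = int(math.ceil(float(total_size) / float(max_size)))
--     for i in range(num):
--         yield (total_size + num - 1 - i) // num
-- ===== Notes on version B (the rewrite author's own statement) =====
-- stated objective: simpler
-- what changed: Replaces A's stateful min_size/rest remainder-countdown loop with a stateless per-index closed form (total_size + num - 1 - i) // num.
-- intended difference: For total_size < 0 and max_size < 0 with num = ceil(total_size/max_size) not dividing total_size, A's int(total_size/num) truncates toward zero so its chunks sum to total_size + num instead of total_size (A gives [-1,-1,-2,-2] for (-10,-3)); B's floor-based chunks ([-2,-2,-3,-3]) sum exactly to total_size, the intended split. — e.g. on _calculate_chunks_sizes(-10, -3): A returns [-1, -1, -2, -2], B returns [-2, -2, -3, -3]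
-- crash fix: When ceil(total_size/max_size) = 0 (total_size = 0, or opposite signs with |total_size| < |max_size|), A raises ZeroDivisionError at total_size/num while B returns []. — e.g. on _calculate_chunks_sizes(0, 5): A raises ZeroDivisionError, B returns []
import Mathlib
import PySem

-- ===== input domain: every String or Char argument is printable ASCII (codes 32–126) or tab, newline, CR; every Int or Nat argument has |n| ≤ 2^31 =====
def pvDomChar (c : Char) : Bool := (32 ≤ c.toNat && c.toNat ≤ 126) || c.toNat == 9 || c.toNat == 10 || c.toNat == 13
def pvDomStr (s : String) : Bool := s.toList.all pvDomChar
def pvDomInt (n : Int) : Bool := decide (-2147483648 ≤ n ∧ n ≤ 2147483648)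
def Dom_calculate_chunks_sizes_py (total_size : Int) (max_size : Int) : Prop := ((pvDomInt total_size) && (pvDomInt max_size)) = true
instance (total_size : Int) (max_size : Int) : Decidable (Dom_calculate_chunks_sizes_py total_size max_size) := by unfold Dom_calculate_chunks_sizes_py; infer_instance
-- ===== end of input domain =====

-- B replaces A's stateful min_size/rest countdown with a stateless per-index closed form (objective: simpler).
-- Both are generators in Python; equivalence is about the produced sequence of values (neither mutates anything).

-- ===== PORT A =====
-- num = int(math.ceil(float(t)/float(m))): on Dom (|args| ≤ 2^31 < 2^53) the double quotient's
-- ceiling equals the exact integer ceiling -((-t) // m); ported as that exact value.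
-- min_size = int(total_size / num): truncation toward zero of the float quotient = Int.tdiv on Dom
-- (same exactness bound).
def calculate_chunks_sizes_py (total_size : Int) (max_size : Int) : List Int :=
  let num : Int := -(PySem.Int.floordiv (-total_size) max_size)
  let min_size : Int := Int.tdiv total_size num
  let rest : Int := PySem.Int.mod total_size num
  ((PySem.List.pyRange 0 num 1).foldl
    (fun (acc : List Int × Int) _ =>
      if acc.2 > 0 then (acc.1 ++ [min_size + 1], acc.2 - 1)
      else (acc.1 ++ [min_size], acc.2)) ([], rest)).1

-- ===== PORT B =====
def calculate_chunks_sizes_py_alt (total_size : Int) (max_size : Int) : List Int :=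
  let num : Int := -(PySem.Int.floordiv (-total_size) max_size)
  (PySem.List.pyRange 0 num 1).map
    (fun i => PySem.Int.floordiv (total_size + num - 1 - i) num)

-- ===== PRECONDITION & SPEC =====
-- Pre_ excludes exactly the inputs where A raises ZeroDivisionError: max_size = 0 (the float
-- division), and num = ceil(total_size/max_size) = 0 (total_size = 0, or opposite signs with
-- |total_size| < |max_size|), where total_size / num divides by zero.
def Pre_calculate_chunks_sizes_py (total_size : Int) (max_size : Int) : Prop :=
  max_size ≠ 0 ∧ total_size ≠ 0 ∧
    ((0 < total_size ∧ 0 < max_size) ∨ (total_size < 0 ∧ max_size < 0) ∨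
      max_size.natAbs ≤ total_size.natAbs)
instance (total_size : Int) (max_size : Int) : Decidable (Pre_calculate_chunks_sizes_py total_size max_size) := by unfold Pre_calculate_chunks_sizes_py; infer_instance

def pvWitness_calculate_chunks_sizes_py : Int × Int := (10, 3)

-- When ceil(total_size/max_size) = 0 (total_size = 0, or opposite signs with |total_size| < |max_size|),
-- A raises ZeroDivisionError at total_size/num while B returns [].
def Raises_calculate_chunks_sizes_py (total_size : Int) (max_size : Int) : Prop :=
  max_size ≠ 0 ∧
    (total_size = 0 ∨
      (((0 < total_size ∧ max_size < 0) ∨ (total_size < 0 ∧ 0 < max_size)) ∧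
        total_size.natAbs < max_size.natAbs))
instance (total_size : Int) (max_size : Int) : Decidable (Raises_calculate_chunks_sizes_py total_size max_size) := by unfold Raises_calculate_chunks_sizes_py; infer_instance
def pvRaiseWitness_calculate_chunks_sizes_py : Int × Int := (0, 5)
def pvRaiseWitnessOut_calculate_chunks_sizes_py : List Int := []

-- For total_size < 0 and max_size < 0 with num = ceil(total_size/max_size) not dividing total_size,
-- A's int(total_size/num) truncates toward zero so its chunks sum to total_size + num instead of
-- total_size; B's floor-based chunks sum exactly to total_size, the intended split.
def D_calculate_chunks_sizes_py (total_size : Int) (max_size : Int) : Prop :=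
  total_size < 0 ∧ max_size < 0 ∧
    ¬ ((((-total_size) + (-max_size) - 1) / (-max_size)) ∣ total_size)
instance (total_size : Int) (max_size : Int) : Decidable (D_calculate_chunks_sizes_py total_size max_size) := by unfold D_calculate_chunks_sizes_py; infer_instance

def Spec_calculate_chunks_sizes_py (total_size : Int) (max_size : Int) (out : List Int) : Prop := ¬ D_calculate_chunks_sizes_py total_size max_size → out = calculate_chunks_sizes_py_alt total_size max_size
instance (total_size : Int) (max_size : Int) (out : List Int) : Decidable (Spec_calculate_chunks_sizes_py total_size max_size out) := by unfold Spec_calculate_chunks_sizes_py; infer_instance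

def pvDiffWitness_calculate_chunks_sizes_py : Int × Int := (-10, -3)
def pvDiffWitnessOut_calculate_chunks_sizes_py : (List Int) × (List Int) :=
  ([-1, -1, -2, -2], [-2, -2, -3, -3])

-- ===== CLAIM (what is proved, stated in full; the proofs are below) =====
def Claim_unchanged_calculate_chunks_sizes_py : Prop := ∀ (total_size : Int) (max_size : Int), Dom_calculate_chunks_sizes_py total_size max_size → Pre_calculate_chunks_sizes_py total_size max_size → Spec_calculate_chunks_sizes_py total_size max_size (calculate_chunks_sizes_py total_size max_size)
def Claim_changed_calculate_chunks_sizes_py : Prop := Dom_calculate_chunks_sizes_py (pvDiffWitness_calculate_chunks_sizes_py.1) (pvDiffWitness_calculate_chunks_sizes_py.2) ∧ Pre_calculate_chunks_sizes_py (pvDiffWitness_calculate_chunks_sizes_py.1) (pvDiffWitness_calculate_chunks_sizes_py.2) ∧ D_calculate_chunks_sizes_py (pvDiffWitness_calculate_chunks_sizes_py.1) (pvDiffWitness_calculate_chunks_sizes_py.2) ∧ calculate_chunks_sizes_py (pvDiffWitness_calculate_chunks_sizes_py.1) (pvDiffWitness_calculate_chunks_sizes_py.2) = pvDiffWitnessOut_calculate_chunks_sizes_py.1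 ∧ calculate_chunks_sizes_py_alt (pvDiffWitness_calculate_chunks_sizes_py.1) (pvDiffWitness_calculate_chunks_sizes_py.2) = pvDiffWitnessOut_calculate_chunks_sizes_py.2 ∧ pvDiffWitnessOut_calculate_chunks_sizes_py.1 ≠ pvDiffWitnessOut_calculate_chunks_sizes_py.2
def Claim_exact_calculate_chunks_sizes_py : Prop := ∀ (total_size : Int) (max_size : Int), Dom_calculate_chunks_sizes_py total_size max_size → Pre_calculate_chunks_sizes_py total_size max_size → D_calculate_chunks_sizes_py total_size max_size → calculate_chunks_sizes_py total_size max_size ≠ calculate_chunks_sizes_py_alt total_size max_size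
def Claim_raises_calculate_chunks_sizes_py : Prop := (∀ (total_size : Int) (max_size : Int), Dom_calculate_chunks_sizes_py total_size max_size → Raises_calculate_chunks_sizes_py total_size max_size → ¬ Pre_calculate_chunks_sizes_py total_size max_size) ∧ (Dom_calculate_chunks_sizes_py (pvRaiseWitness_calculate_chunks_sizes_py.1) (pvRaiseWitness_calculate_chunks_sizes_py.2) ∧ Raises_calculate_chunks_sizes_py (pvRaiseWitness_calculate_chunks_sizes_py.1) (pvRaiseWitness_calculate_chunks_sizes_py.2) ∧ calculate_chunks_sizes_py_alt (pvRaiseWitness_calculate_chunks_sizes_py.1) (pvRaiseWitness_calculate_chunks_sizes_py.2) = pvRaiseWitnessOut_calculate_chunks_sizes_py)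

-- ===== LEMMAS AND PROOFS =====

-- prepending c to an n-term map matches an (n+1)-term map whose head is c
theorem pvConsShift (c : Int) (f g : Nat → Int) (n : Nat)
    (h0 : g 0 = c) (hs : ∀ k, f k = g (k + 1)) :
    c :: (List.range n).map f = (List.range (n + 1)).map g := by
  rw [List.range_succ_eq_map, List.map_cons, h0, List.map_map]
  exact congrArg _ (List.map_congr_left (fun k _ => hs k))

-- A's loop: over any n-element list the fold emits (ms+1) while the countdown is positive, ms after.
theorem pvFoldA_char (ms : Int) (l : List Int) :
    ∀ (out : List Int) (rest : Int), 0 ≤ rest →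
      ((l.foldl
        (fun (acc : List Int × Int) _ =>
          if acc.2 > 0 then (acc.1 ++ [ms + 1], acc.2 - 1)
          else (acc.1 ++ [ms], acc.2)) (out, rest)).1
        = out ++ (List.range l.length).map (fun (k : Nat) => if (k : Int) < rest then ms + 1 else ms)) := by
  induction l with
  | nil => intro out rest _; simp
  | cons x xs ih =>
    intro out rest hrest
    by_cases h : rest > 0
    · have hstep := ih (out ++ [ms + 1]) (rest - 1) (by omega)
      simp only [List.foldl_cons, List.length_cons, h, if_true]
      rw [hstep, List.append_assoc, List.singleton_append]
      refine congrArg (out ++ ·) (pvConsShift _ _ _ _ ?_ ?_)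
      · have h0 : ((0 : Nat) : Int) < rest := by exact_mod_cast h
        rw [if_pos h0]
      · intro k
        have hiff : ((k + 1 : Nat) : Int) < rest ↔ (k : Int) < rest - 1 := by push_cast; omega
        by_cases hk : (k : Int) < rest - 1
        · rw [if_pos hk, if_pos (hiff.mpr hk)]
        · rw [if_neg hk, if_neg (fun hh => hk (hiff.mp hh))]
    · have hr0 : rest = 0 := by omega
      subst hr0
      have hstep := ih (out ++ [ms]) 0 le_rfl
      simp only [List.foldl_cons, List.length_cons, h, if_false]
      rw [hstep, List.append_assoc, List.singleton_append]
      refine congrArg (out ++ ·) (pvConsShift _ _ _ _ ?_ ?_)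
      · rw [if_neg (by omega)]
      · intro k
        rw [if_neg (by omega), if_neg (by omega)]

-- B's closed form at index k equals ms + 1 for k < rest and ms after, when t = ms*num + rest, 0 ≤ rest < num.
theorem pvClosedForm (t num ms rest : Int) (k : Int) (hnum : 0 < num)
    (ht : t = ms * num + rest) (hr0 : 0 ≤ rest) (hr1 : rest < num)
    (hk0 : 0 ≤ k) (hk1 : k < num) :
    PySem.Int.floordiv (t + num - 1 - k) num = if k < rest then ms + 1 else ms := by
  by_cases hk : k < rest
  · rw [if_pos hk, PySem.Int.floordiv_eq_iff_of_pos hnum]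
    constructor <;> nlinarith
  · rw [if_neg hk, PySem.Int.floordiv_eq_iff_of_pos hnum]
    constructor <;> nlinarith

-- on negative/negative inputs the port's ceiling -((-t) // m) equals the closed form ((-t)+(-m)-1)/(-m)
theorem pvNumNegNeg (t m : Int) (hm : m < 0) :
    ((-t) + (-m) - 1) / (-m) = -(PySem.Int.floordiv (-t) m) := by
  have hq : (0 : Int) < -m := by omega
  have h1 : PySem.Int.floordiv (-t) m = PySem.Int.floordiv t (-m) := by
    simpa using PySem.Int.floordiv_neg_neg t (-m)
  have hb : (-(PySem.Int.floordiv t (-m)) - 1) * (-m) < -t ∧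
      -t ≤ -(PySem.Int.floordiv t (-m)) * (-m) :=
    ((PySem.Int.neg_floordiv_neg_eq_iff_of_pos (a := -t) (b := -m)
      (q := -(PySem.Int.floordiv t (-m)))) hq).mp (by rw [neg_neg])
  rw [h1, ← PySem.Int.floordiv_eq_ediv_of_pos hq, PySem.Int.floordiv_eq_iff_of_pos hq]
  constructor <;> nlinarith [hb.1, hb.2]

-- the populated case: extras-first countdown = stateless closed form, whenever num > 0 and
-- int(t/num) agrees with floor division (t ≥ 0, or num ∣ t)
theorem pvMainCore (t m : Int) (hpos : 0 < -(PySem.Int.floordiv (-t) m))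
    (hms : Int.tdiv t (-(PySem.Int.floordiv (-t) m))
      = PySem.Int.floordiv t (-(PySem.Int.floordiv (-t) m))) :
    calculate_chunks_sizes_py t m = calculate_chunks_sizes_py_alt t m := by
  unfold calculate_chunks_sizes_py calculate_chunks_sizes_py_alt
  dsimp only
  set num : Int := -(PySem.Int.floordiv (-t) m) with hnumdef
  set ms := PySem.Int.floordiv t num with hmsdef
  set rest := PySem.Int.mod t num with hrestdef
  have hsum : ms * num + rest = t := PySem.Int.floordiv_mul_add_mod t num
  have hr0 : 0 ≤ rest := by
    rw [hrestdef, PySem.Int.mod_eq_emod_of_pos hpos]; exact Int.emod_nonneg t (by omega)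
  have hr1 : rest < num := by
    rw [hrestdef, PySem.Int.mod_eq_emod_of_pos hpos]; exact Int.emod_lt_of_pos t hpos
  simp only [hms]
  rw [pvFoldA_char ms _ [] rest hr0, PySem.List.pyRange_one]
  simp only [List.length_map, List.length_range, List.map_map, List.nil_append, sub_zero]
  apply List.map_congr_left
  intro k hk
  have hk1 : (k : Int) < num := by
    have hkn := List.mem_range.mp hk
    omega
  simp only [Function.comp, zero_add]
  rw [pvClosedForm t num ms rest k hpos hsum.symm hr0 hr1 (by positivity) hk1]

-- positive sizes: num > 0 and int(t/num) is plain floor division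
theorem pvMainPos (t m : Int) (htpos : 0 < t) (hmpos : 0 < m) :
    calculate_chunks_sizes_py t m = calculate_chunks_sizes_py_alt t m := by
  have hb : (-(PySem.Int.floordiv (-t) m) - 1) * m < t ∧ t ≤ -(PySem.Int.floordiv (-t) m) * m :=
    (PySem.Int.neg_floordiv_neg_eq_iff_of_pos hmpos).mp rfl
  have hpos : 0 < -(PySem.Int.floordiv (-t) m) := by nlinarith [hb.2]
  exact pvMainCore t m hpos
    (by rw [Int.tdiv_eq_ediv_of_nonneg (by omega), PySem.Int.floordiv_eq_ediv_of_pos hpos])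

-- negative sizes with num ∣ t: int(t/num) = t/num exactly, so the two splits also agree
theorem pvMainNegDvd (t m : Int) (ht : t < 0) (hm : m < 0)
    (hdvd : (((-t) + (-m) - 1) / (-m)) ∣ t) :
    calculate_chunks_sizes_py t m = calculate_chunks_sizes_py_alt t m := by
  have hq : (0 : Int) < -m := by omega
  have hnn := pvNumNegNeg t m hm
  have hpos : 0 < -(PySem.Int.floordiv (-t) m) := by
    rw [← hnn]
    have h1 : (1 : Int) ≤ ((-t) + (-m) - 1) / (-m) := by
      rw [← PySem.Int.floordiv_eq_ediv_of_pos hq, PySem.Int.le_floordiv_iff_mul_le hq]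
      omega
    omega
  rw [hnn] at hdvd
  exact pvMainCore t m hpos
    (by rw [Int.tdiv_eq_ediv_of_dvd hdvd, PySem.Int.floordiv_eq_ediv_of_pos hpos])

-- mixed signs with |total| ≥ |max|: num ≤ -1 and both sides are []
theorem pvMixedEmpty (t m : Int) (hmix : (0 < t ∧ m < 0) ∨ (t < 0 ∧ 0 < m))
    (habs : m.natAbs ≤ t.natAbs) :
    calculate_chunks_sizes_py t m = calculate_chunks_sizes_py_alt t m := by
  unfold calculate_chunks_sizes_py calculate_chunks_sizes_py_alt
  dsimp only
  have hnum : -(PySem.Int.floordiv (-t) m) ≤ 0 := by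
    rcases hmix with ⟨ht, hm⟩ | ⟨ht, hm⟩
    · have h1 : PySem.Int.floordiv (-t) m = PySem.Int.floordiv t (-m) := by
        have := PySem.Int.floordiv_neg_neg t (-m)
        simpa using this
      have h2 : (1 : Int) ≤ PySem.Int.floordiv t (-m) := by
        rw [PySem.Int.le_floordiv_iff_mul_le (by omega)]; omega
      omega
    · have h2 : (1 : Int) ≤ PySem.Int.floordiv (-t) m := by
        rw [PySem.Int.le_floordiv_iff_mul_le (by omega)]; omega
      omega
  rw [PySem.List.pyRange_one_eq_nil (by omega)]
  simp

-- ===== VERDICT (by name: the statement is the Claim_ definition above) =====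
theorem calculate_chunks_sizes_py_spec : Claim_unchanged_calculate_chunks_sizes_py := by
  intro t m _ hpre hnd
  obtain ⟨hm, ht, hcase⟩ := hpre
  have hnegneg : ∀ ht0 : t < 0, ∀ hm0 : m < 0,
      calculate_chunks_sizes_py t m = calculate_chunks_sizes_py_alt t m := by
    intro ht0 hm0
    by_cases hdvd : (((-t) + (-m) - 1) / (-m)) ∣ t
    · exact pvMainNegDvd t m ht0 hm0 hdvd
    · exact absurd ⟨ht0, hm0, hdvd⟩ hnd
  rcases hcase with ⟨ht0, hm0⟩ | ⟨ht0, hm0⟩ | habs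
  · exact pvMainPos t m ht0 hm0
  · exact hnegneg ht0 hm0
  · rcases lt_trichotomy t 0 with ht0 | ht0 | ht0 <;>
      rcases lt_trichotomy m 0 with hm0 | hm0 | hm0
    · exact hnegneg ht0 hm0
    · exact absurd hm0 hm
    · exact pvMixedEmpty t m (Or.inr ⟨ht0, hm0⟩) habs
    · exact absurd ht0 ht
    · exact absurd ht0 ht
    · exact absurd ht0 ht
    · exact pvMixedEmpty t m (Or.inl ⟨ht0, hm0⟩) habs
    · exact absurd hm0 hm
    · exact pvMainPos t m ht0 hm0

theorem calculate_chunks_sizes_py_changed : Claim_changed_calculate_chunks_sizes_py := by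
  unfold Claim_changed_calculate_chunks_sizes_py; decide

@[simp] theorem calculate_chunks_sizes_py_raises : Claim_raises_calculate_chunks_sizes_py := by
  unfold Claim_raises_calculate_chunks_sizes_py
  refine ⟨?_, by decide⟩
  rintro t m _ ⟨hm, hcase⟩ ⟨hm', ht, hpre⟩
  rcases hcase with h0 | ⟨hsgn, habs⟩
  · exact ht h0
  · rcases hsgn with ⟨h1, h2⟩ | ⟨h1, h2⟩ <;> rcases hpre with ⟨_, _⟩ | ⟨_, _⟩ | h3 <;> omega

theorem calculate_chunks_sizes_py_tight : Claim_exact_calculate_chunks_sizes_py := by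
  intro t m _ _ hd
  obtain ⟨ht, hm, hndvd⟩ := hd
  have hq : (0 : Int) < -m := by omega
  have hnn := pvNumNegNeg t m hm
  unfold calculate_chunks_sizes_py calculate_chunks_sizes_py_alt
  dsimp only
  set num : Int := -(PySem.Int.floordiv (-t) m) with hnumdef
  have hpos : 0 < num := by
    rw [← hnn]
    have h1 : (1 : Int) ≤ ((-t) + (-m) - 1) / (-m) := by
      rw [← PySem.Int.floordiv_eq_ediv_of_pos hq, PySem.Int.le_floordiv_iff_mul_le hq]
      omega
    omega
  rw [hnn] at hndvd
  set fl := PySem.Int.floordiv t num with hfldef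
  set rest := PySem.Int.mod t num with hrestdef
  have hsum : fl * num + rest = t := PySem.Int.floordiv_mul_add_mod t num
  have hr0 : 0 ≤ rest := by
    rw [hrestdef, PySem.Int.mod_eq_emod_of_pos hpos]; exact Int.emod_nonneg t (by omega)
  have hr1 : rest < num := by
    rw [hrestdef, PySem.Int.mod_eq_emod_of_pos hpos]; exact Int.emod_lt_of_pos t hpos
  have hrne : rest ≠ 0 := by
    intro h0
    exact hndvd ((PySem.Int.mod_eq_zero_iff_dvd t num).mp (hrestdef ▸ h0))
  have hrpos : 0 < rest := lt_of_le_of_ne hr0 (Ne.symm hrne)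
  -- A's min_size: truncation toward zero = fl + 1 on a negative non-divisible t
  have hmin : Int.tdiv t num = fl + 1 := by
    have h1 : t.tdiv num = -((-t).tdiv num) := by
      have h := Int.neg_tdiv (-t) num
      rw [neg_neg] at h
      omega
    have h2 : (-t).tdiv num = PySem.Int.floordiv (-t) num := by
      rw [Int.tdiv_eq_ediv_of_nonneg (by omega), PySem.Int.floordiv_eq_ediv_of_pos hpos]
    have h3 : PySem.Int.floordiv (-t) num = -fl - 1 := by
      rw [PySem.Int.floordiv_eq_iff_of_pos hpos]
      constructor <;> nlinarith [hrpos, hr1, hsum]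
    rw [h1, h2, h3]; ring
  -- B's first chunk is fl + 1; A's is fl + 2
  have hg0 : PySem.Int.floordiv (t + num - 1) num = fl + 1 := by
    rw [PySem.Int.floordiv_eq_iff_of_pos hpos]
    constructor <;> nlinarith [hrpos, hr1, hsum]
  intro heq
  rw [hmin, pvFoldA_char _ _ [] rest hr0, PySem.List.pyRange_one] at heq
  simp only [List.length_map, List.length_range, List.map_map, List.nil_append, sub_zero] at heq
  have h0 := congrArg (fun l => l[0]?) heq
  have hn0 : 0 < num.toNat := by omega
  simp only [List.getElem?_map, List.getElem?_range, hn0, Option.map_some,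
    Function.comp, Nat.cast_zero, zero_add, sub_zero] at h0
  rw [hg0] at h0
  have hlt : (0 : Int) < rest := hrpos
  rw [if_pos hlt] at h0
  simp only [Option.some.injEq] at h0
  omega
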